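-- pv_equiv track=rewrite | github.com/Paintako/VITS-TCP_server | api/Frontend/Indonesian/phoneme_process/syllable.py | _combine_syllable
-- ===== SOURCE A (Python) =====
-- VOWELS = list('aiueo*()-')
--
-- def _combine_syllable(syllables):
--     syllable = ""
--     result = []
--     i = 0
--
--     # Not perfect!!!
--     # 1st: need to add special case for prefix(ek, eks), middle(st, str), prefix(tran, trans), middle(sk)
--     # 2nd: need to check for the root words like: belajar (ajar) => bel.a.jar not be.la.jar
--     # 3rd: need to separate the words with root words and its prefix, suffix
--     while i < len(syllables):
--         syllable = syllables[i]
--         # if current syllable has vowel then check for the next syllable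
--         if _vowel_exist(syllables[i]):
--             # if the successive syllable(s) is only consonant then combine them together as one syllable
--             while i != len(syllables) - 1 and not _vowel_exist(syllables[i+1]):
--                 syllable += syllables[i+1]
--                 i += 1
--         # else if current syllable is consonant and next syllable first char is also consonant then combine them
--         # ex: flu -> f.lu -> flu
--         elif i != len(syllables) - 1 and syllables[i+1][0] not in VOWELS:
--             syllable += syllables[i+1]
--             i += 1
--         i += 1
--         result.append(syllable)
--
--     return result
--
-- def _vowel_exist(syllable):
--     for vowel in VOWELS:
--         if vowel in syllable:
--             return True
--     return False
-- ===== SOURCE B (Python) =====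
-- VOWELS = list('aiueo*()-')
--
-- def _vowel_exist(syllable):
--     for vowel in VOWELS:
--         if vowel in syllable:
--             return True
--     return False
--
-- def _combine_syllable(syllables):
--     # single forward pass with a state for the last emitted group:
--     # 0 = closed (or nothing emitted yet), 1 = vowel group still open, 2 = lone consonant group pending
--     result = []
--     mode = 0
--     for s in syllables:
--         if mode == 1 and not _vowel_exist(s):
--             result[-1] += s
--         elif mode == 2 and s[0] not in VOWELS:
--             result[-1] += s
--             mode = 0
--         else:
--             result.append(s)
--             mode = 1 if _vowel_exist(s) else 2
--     return result
-- ===== Notes on version B (the rewrite author's own statement) =====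
-- stated objective: simpler
-- what changed: Replaced A's index-driven outer loop with a lookahead inner while-loop by a single flat for-loop over the syllables that looks behind, keeping a mode state (closed / open vowel group / pending consonant group) and appending to the last emitted group.
-- outside the precondition, e.g. on _combine_syllable(['a', 'x', '']): A returns ['ax'], B returns ['ax']
import Mathlib
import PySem

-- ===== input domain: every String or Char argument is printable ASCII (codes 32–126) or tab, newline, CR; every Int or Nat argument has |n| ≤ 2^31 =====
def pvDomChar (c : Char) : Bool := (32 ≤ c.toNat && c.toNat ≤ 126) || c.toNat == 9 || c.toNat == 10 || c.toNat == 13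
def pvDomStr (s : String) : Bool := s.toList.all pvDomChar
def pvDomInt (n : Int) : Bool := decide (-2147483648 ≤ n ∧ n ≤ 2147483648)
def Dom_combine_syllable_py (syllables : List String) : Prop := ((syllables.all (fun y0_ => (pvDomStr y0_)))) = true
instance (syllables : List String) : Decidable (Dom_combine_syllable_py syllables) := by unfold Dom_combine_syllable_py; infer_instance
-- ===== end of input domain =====

-- B replaces A's index loop with lookahead inner while-loop by one flat pass keeping a mode
-- state for the last emitted group (objective: simpler).


-- ===== PORT A =====
-- VOWELS = list('aiueo*()-') : a list of single characters, so the Python membership tests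
-- 'vowel in syllable' and "s[0] not in VOWELS" are character-membership tests (exact).
def pvVowels : List Char := ['a', 'i', 'u', 'e', 'o', '*', '(', ')', '-']

-- _vowel_exist: scan VOWELS, return True on the first vowel contained in the syllable
def vowelExist (s : String) : Bool := pvVowels.any (fun v => s.toList.contains v)

-- A's inner while: absorb successive vowel-less syllables into the current syllable
def absorbA (syl : String) : List String → String × List String
  | [] => (syl, [])
  | t :: rest => if ¬ vowelExist t then absorbA (syl ++ t) rest else (syl, t :: rest)

theorem absorbA_len (rest : List String) (syl : String) :
    (absorbA syl rest).2.length ≤ rest.length := by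
  induction rest generalizing syl with
  | nil => simp [absorbA]
  | cons t rest ih =>
    simp only [absorbA]
    split
    · exact le_trans (ih _) (Nat.le_succ _)
    · simp

-- A's outer while over the remaining suffix of syllables (i only moves forward)
def loopA : List String → List String
  | [] => []
  | s :: rest =>
    if vowelExist s then
      (absorbA s rest).1 :: loopA (absorbA s rest).2
    else
      match rest with
      | [] => [s]
      | t :: rest' =>
        match PySem.Str.pyGet? t 0 with
        | some c =>
          if ¬ pvVowels.contains c then (s ++ t) :: loopA rest'
          else s :: loopA (t :: rest')
        | none => s :: loopA (t :: rest')  -- Python raises IndexError here (t = ""); excluded by Pre_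
termination_by l => l.length
decreasing_by
  · have := absorbA_len rest s; simp only [List.length_cons]; omega
  · simp only [List.length_cons]; omega
  · simp only [List.length_cons]; omega

def combine_syllable_py (syllables : List String) : List String := loopA syllables

-- ===== PORT B =====
-- result[-1] += s; Python raises on empty result, but B's mode invariant (mode ≠ 0 → result ≠ [])
-- keeps that unreachable, so the [] case is arbitrary
def addToLastB : List String → String → List String
  | [], _ => []
  | [x], s => [x ++ s]
  | x :: y :: xs, s => x :: addToLastB (y :: xs) s

-- s[0] not in VOWELS (only evaluated when mode = 2)
def firstConsB (s : String) : Bool :=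
  match PySem.Str.pyGet? s 0 with
  | some c => ¬ pvVowels.contains c
  | none => false  -- Python raises IndexError here (s = ""); excluded by Pre_

-- one step of B's for-loop: state = (result, mode)
def stepB (st : List String × Nat) (s : String) : List String × Nat :=
  if st.2 = 1 ∧ ¬ vowelExist s then (addToLastB st.1 s, 1)
  else if st.2 = 2 ∧ firstConsB s then (addToLastB st.1 s, 0)
  else (st.1 ++ [s], if vowelExist s then 1 else 2)

def combine_syllable_py_alt (syllables : List String) : List String :=
  (syllables.foldl stepB ([], 0)).1

-- ===== PRECONDITION & SPEC =====
-- Pre_ excludes lists in which the empty string immediately follows a vowel-less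
-- syllable: there A can raise IndexError ("" has no char 0), and where A still returns
-- (the pair was already absorbed into an earlier vowel group) the corner is not claimed.
def Pre_combine_syllable_py (syllables : List String) : Prop :=
  ∀ p ∈ syllables.zip syllables.tail, p.2 = "" → vowelExist p.1 = true
instance (syllables : List String) : Decidable (Pre_combine_syllable_py syllables) := by
  unfold Pre_combine_syllable_py; infer_instance

def pvWitness_combine_syllable_py : List String := ["ma", "kan", "f", "lu"]

def Spec_combine_syllable_py (syllables : List String) (out : List String) : Prop := out = combine_syllable_py_alt syllables
instance (syllables : List String) (out : List String) : Decidable (Spec_combine_syllable_py syllables out) := by unfold Spec_combine_syllable_py; infer_instance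

-- ===== CLAIM (what is proved, stated in full; the proofs are below) =====
def Claim_equal_combine_syllable_py : Prop := ∀ (syllables : List String), Dom_combine_syllable_py syllables → Pre_combine_syllable_py syllables → Spec_combine_syllable_py syllables (combine_syllable_py syllables)

-- ===== LEMMAS AND PROOFS =====

theorem addToLastB_append : ∀ (res : List String) (x s : String),
    addToLastB (res ++ [x]) s = res ++ [x ++ s]
  | [], x, s => by simp [addToLastB]
  | [a], x, s => by simp [addToLastB]
  | a :: b :: res, x, s => by
    have ih := addToLastB_append (b :: res) x s
    simp only [List.cons_append] at ih
    simp [addToLastB, ih]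

theorem toList_ne_nil_of_ne (t : String) (h : t ≠ "") : t.toList ≠ [] := by
  intro hnil
  exact h (String.toList_eq_nil_iff.mp hnil)

theorem pyGet0_of_ne (t : String) (h : t ≠ "") :
    ∃ c, PySem.List.pyGet? t.toList 0 = some c := by
  cases ht : t.toList with
  | nil => exact absurd ht (toList_ne_nil_of_ne t h)
  | cons c cs =>
    exact ⟨c, PySem.List.pyGet?_zero_cons c cs⟩

theorem vowelExist_of_head (t : String) (c : Char)
    (h : PySem.List.pyGet? t.toList 0 = some c) (hm : c ∈ pvVowels) :
    vowelExist t = true := by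
  have hmem : c ∈ t.toList := by
    apply PySem.List.mem_of_pyGet?_eq_some
    exact h
  simp only [vowelExist, List.any_eq_true]
  exact ⟨c, by simpa using hm, by simpa using hmem⟩

-- equation lemmas for loopA (well-founded recursion does not unfold definitionally)
theorem loopA_vowel (s : String) (rest : List String) (hv : vowelExist s = true) :
    loopA (s :: rest) = (absorbA s rest).1 :: loopA (absorbA s rest).2 := by
  rw [loopA.eq_def]
  simp [hv]

theorem loopA_single (s : String) (hv : vowelExist s = false) : loopA [s] = [s] := by
  rw [loopA.eq_def]
  simp [hv]

theorem loopA_merge (s t : String) (rest : List String) (c : Char)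
    (hv : vowelExist s = false) (hc : PySem.List.pyGet? t.toList 0 = some c)
    (hm : c ∉ pvVowels) : loopA (s :: t :: rest) = (s ++ t) :: loopA rest := by
  rw [loopA.eq_def]
  simp [hv, hc, hm]

theorem loopA_nomerge (s t : String) (rest : List String) (c : Char)
    (hv : vowelExist s = false) (hc : PySem.List.pyGet? t.toList 0 = some c)
    (hm : c ∈ pvVowels) : loopA (s :: t :: rest) = s :: loopA (t :: rest) := by
  rw [loopA.eq_def]
  simp [hv, hc, hm]

theorem preTail (s : String) (rest : List String)
    (h : ∀ p ∈ (s :: rest).zip (s :: rest).tail, p.2 = "" → vowelExist p.1 = true) :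
    ∀ p ∈ rest.zip rest.tail, p.2 = "" → vowelExist p.1 = true := by
  cases rest with
  | nil => simp
  | cons r rs =>
    intro p hp
    exact h p (by simp at hp ⊢; tauto)

theorem preHead (s : String) (rest : List String)
    (h : ∀ p ∈ (s :: rest).zip (s :: rest).tail, p.2 = "" → vowelExist p.1 = true)
    (hv : vowelExist s = false) : ∀ hd, rest.head? = some hd → hd ≠ "" := by
  cases rest with
  | nil => simp
  | cons r rs =>
    intro hd hhd he
    have := h (s, r) (by simp)
    simp at hhd this
    rw [← hhd] at he
    rw [this he] at hv
    cases hv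

theorem keyB (l : List String) :
    (∀ p ∈ l.zip l.tail, p.2 = "" → vowelExist p.1 = true) →
    (∀ res : List String, (List.foldl stepB (res, 0) l).1 = res ++ loopA l) ∧
    (∀ (res : List String) (x : String),
      (List.foldl stepB (res ++ [x], 1) l).1 = res ++ (absorbA x l).1 :: loopA (absorbA x l).2) ∧
    (∀ (res : List String) (x : String), vowelExist x = false →
      (∀ hd, l.head? = some hd → hd ≠ "") →
      (List.foldl stepB (res ++ [x], 2) l).1 = res ++ loopA (x :: l)) := by
  induction l with
  | nil =>
    intro _
    refine ⟨?_, ?_, ?_⟩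
    · intro res; simp [loopA]
    · intro res x; simp [absorbA, loopA]
    · intro res x hx _; simp [loopA_single x hx]
  | cons s rest ih =>
    intro h
    obtain ⟨ih0, ih1, ih2⟩ := ih (preTail s rest h)
    refine ⟨?_, ?_, ?_⟩
    · -- mode 0
      intro res
      by_cases hv : vowelExist s = true
      · have hstep : stepB (res, 0) s = (res ++ [s], 1) := by simp [stepB, hv]
        rw [List.foldl_cons, hstep, ih1 res s, loopA_vowel s rest hv]
      · have hstep : stepB (res, 0) s = (res ++ [s], 2) := by simp [stepB, hv]
        rw [List.foldl_cons, hstep,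
            ih2 res s (by simpa using hv) (preHead s rest h (by simpa using hv))]
    · -- mode 1 (open vowel group)
      intro res x
      by_cases hv : vowelExist s = true
      · have hstep : stepB (res ++ [x], 1) s = ((res ++ [x]) ++ [s], 1) := by simp [stepB, hv]
        have habs : absorbA x (s :: rest) = (x, s :: rest) := by simp [absorbA, hv]
        rw [List.foldl_cons, hstep, ih1 (res ++ [x]) s, habs, loopA_vowel s rest hv]
        simp
      · have hstep : stepB (res ++ [x], 1) s = (res ++ [x ++ s], 1) := by
          simp [stepB, hv, addToLastB_append]
        have habs : absorbA x (s :: rest) = absorbA (x ++ s) rest := by simp [absorbA, hv]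
        rw [List.foldl_cons, hstep, ih1 res (x ++ s), habs]
    · -- mode 2 (pending consonant group)
      intro res x hx hhd
      have hs : s ≠ "" := hhd s (by simp)
      obtain ⟨c, hc⟩ := pyGet0_of_ne s hs
      by_cases hm : c ∈ pvVowels
      · have hv : vowelExist s = true := vowelExist_of_head s c hc hm
        have hfc : firstConsB s = false := by simp [firstConsB, hc, hm]
        have hstep : stepB (res ++ [x], 2) s = ((res ++ [x]) ++ [s], 1) := by
          simp [stepB, hfc, hv]
        rw [List.foldl_cons, hstep, ih1 (res ++ [x]) s,
            loopA_nomerge x s rest c hx hc hm, loopA_vowel s rest hv]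
        simp
      · have hfc : firstConsB s = true := by simp [firstConsB, hc, hm]
        have hstep : stepB (res ++ [x], 2) s = (res ++ [x ++ s], 0) := by
          simp [stepB, hfc, addToLastB_append]
        rw [List.foldl_cons, hstep, ih0 (res ++ [x ++ s]),
            loopA_merge x s rest c hx hc hm]
        simp

theorem combine_syllable_py_spec : Claim_equal_combine_syllable_py := by
  intro l _ hpre
  unfold Spec_combine_syllable_py combine_syllable_py combine_syllable_py_alt
  rw [(keyB l hpre).1 []]
  simp
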